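-- pv_equiv track=rewrite | github.com/adebali/NGStoolkit | bin/utils/generalUtils.py | funIn2out
-- ===== SOURCE A (Python) =====
-- def in2out(input, oldExtension, newExtension):
-- 	if input.endswith(oldExtension):
-- 		output = replaceLast(input, oldExtension, newExtension)
-- 	else:
-- 		output = input + oldExtension
-- 	return output
--
-- def replaceLast(source_string, replace_what, replace_with):
-- 	head, sep, tail = source_string.rpartition(replace_what)
-- 	return head + replace_with + tail
--
-- def funIn2out(functionName, input, extraWord = '', abbreviationLength = 3):
-- 	fl = functionName.split('_')
-- 	method = fl[0]
-- 	extensions = fl[1]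
-- 	if extensions.count('2') != 1:
-- 		raise ValueError('2 must be used and it has to be used only once. Eg: functionName_fa2csv')
-- 	el = extensions.split('2')
-- 	extensionIn = el[0]
-- 	extensionOut = el[1]
-- 	string = ''
-- 	start = True
-- 	for letter in fl[0]:
-- 		if letter.isupper() or start == True:
-- 			wordStart = 1
-- 			string += letter
-- 		elif wordStart < abbreviationLength:
-- 			string += letter
-- 			wordStart += 1
-- 		start = False
-- 	string += extraWord
-- 	return in2out(input, '.' + extensionIn, '.' + string + '.' + extensionOut)
-- ===== SOURCE B (Python) =====
-- def funIn2out(functionName, input, extraWord = '', abbreviationLength = 3):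
--     parts = functionName.split('_')
--     method = parts[0]
--     extensions = parts[1]
--     if extensions.count('2') != 1:
--         raise ValueError('2 must be used and it has to be used only once. Eg: functionName_fa2csv')
--     extensionIn, extensionOut = extensions.split('2')
--     # phase 1: segment method into full words (new word at index 0 and at every uppercase letter)
--     words = []
--     for ch in method:
--         if not words or ch.isupper():
--             words.append(ch)
--         else:
--             words[-1] += ch
--     # phase 2: truncate each word (the word-start letter is always kept)
--     keep = max(abbreviationLength, 1)
--     abbrev = ''.join(w[:keep] for w in words) + extraWord
--     oldExtension = '.' + extensionIn
--     newExtension = '.' + abbrev + '.' + extensionOut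
--     if input.endswith(oldExtension):
--         return input[:len(input) - len(oldExtension)] + newExtension
--     return input + oldExtension
-- ===== Notes on version B (the rewrite author's own statement) =====
-- stated objective: simpler
-- what changed: The stateful per-letter truncation loop (start/wordStart counters) is replaced by a two-phase decomposition: segment the method into a list of full words (new word at index 0 and at each uppercase letter), then join the sliced prefixes; replaceLast/rpartition is replaced by direct suffix removal, valid because it is only reached when the input ends with the old extension.
import Mathlib
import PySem

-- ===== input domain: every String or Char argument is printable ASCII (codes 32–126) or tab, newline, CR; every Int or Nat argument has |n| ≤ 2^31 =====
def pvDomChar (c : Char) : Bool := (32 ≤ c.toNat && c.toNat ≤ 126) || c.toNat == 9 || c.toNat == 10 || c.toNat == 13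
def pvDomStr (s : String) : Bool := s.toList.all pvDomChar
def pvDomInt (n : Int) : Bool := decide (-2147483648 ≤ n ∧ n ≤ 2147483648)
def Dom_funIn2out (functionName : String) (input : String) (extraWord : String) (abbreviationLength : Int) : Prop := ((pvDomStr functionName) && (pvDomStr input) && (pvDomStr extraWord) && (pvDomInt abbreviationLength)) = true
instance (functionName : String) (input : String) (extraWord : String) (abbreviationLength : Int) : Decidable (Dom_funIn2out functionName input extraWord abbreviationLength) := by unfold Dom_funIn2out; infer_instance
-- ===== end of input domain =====

-- B replaces A's stateful per-letter truncation loop by a word-list-then-slice decomposition and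
-- replaceLast/rpartition by direct suffix removal (objective: simpler).


-- ===== PORT A =====

-- hand port of str.rpartition (builtin; sep ≠ '' on every call site): split at the LAST occurrence of sep
def pvRpartition (s sep : List Char) : List Char × List Char × List Char :=
  match (List.range (s.length - sep.length + 1)).reverse.find? (fun i => decide (sep <+: s.drop i)) with
  | some i => (s.take i, sep, s.drop (i + sep.length))
  | none => ([], [], s)

-- replaceLast(source_string, replace_what, replace_with)
def pvReplaceLast (sourceString replaceWhat replaceWith : List Char) : List Char :=
  let hst := pvRpartition sourceString replaceWhat
  hst.1 ++ replaceWith ++ hst.2.2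

-- in2out(input, oldExtension, newExtension)
def pvIn2out (input oldExtension newExtension : List Char) : List Char :=
  if PySem.Chars.endswith input oldExtension then
    pvReplaceLast input oldExtension newExtension
  else
    input ++ oldExtension

-- port of A; "" where the Python raises (IndexError on missing '_', ValueError on the '2' count) — excluded by Pre_
-- (Python locals fl/method/el/extensionIn/extensionOut/string are inlined)
def funIn2out (functionName : String) (input : String) (extraWord : String) (abbreviationLength : Int) : String :=
  match PySem.List.pyGet? (PySem.Chars.splitOn functionName.toList ['_']) 1 with
  | none => ""          -- IndexError on fl[1]
  | some extensions =>
    if PySem.Chars.count extensions ['2'] ≠ 1 then ""  -- raise ValueError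
    else
      String.ofList (pvIn2out input.toList
        ('.' :: (PySem.List.pyGet? (PySem.Chars.splitOn extensions ['2']) 0).getD [])
        ('.' ::
          ((((PySem.List.pyGet? (PySem.Chars.splitOn functionName.toList ['_']) 0).getD []).foldl
            (fun (acc : List Char × Bool × Int) letter =>
              if PySem.Chars.isupper letter || acc.2.1 then (acc.1 ++ [letter], false, 1)
              else if acc.2.2 < abbreviationLength then (acc.1 ++ [letter], false, acc.2.2 + 1)
              else (acc.1, false, acc.2.2)) ([], true, 0)).1 ++ extraWord.toList)
          ++ '.' :: (PySem.List.pyGet? (PySem.Chars.splitOn extensions ['2']) 1).getD []))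

-- ===== PORT B =====

-- port of B; "" where the Python raises, as in port A (Python locals inlined likewise)
def funIn2out_alt (functionName : String) (input : String) (extraWord : String) (abbreviationLength : Int) : String :=
  match PySem.List.pyGet? (PySem.Chars.splitOn functionName.toList ['_']) 1 with
  | none => ""          -- IndexError on parts[1]
  | some extensions =>
    if PySem.Chars.count extensions ['2'] ≠ 1 then ""  -- raise ValueError
    else
      -- phase 1 (words), phase 2 (slice each word by keep = max(abbreviationLength, 1) and join)
      if PySem.Chars.endswith input.toList
          ('.' :: (PySem.List.pyGet? (PySem.Chars.splitOn extensions ['2']) 0).getD []) then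
        String.ofList (PySem.List.slice input.toList none
            (some ((input.toList.length : Int) -
              ('.' :: (PySem.List.pyGet? (PySem.Chars.splitOn extensions ['2']) 0).getD []).length)) ++
          ('.' ::
            (((((PySem.List.pyGet? (PySem.Chars.splitOn functionName.toList ['_']) 0).getD []).foldl
              (fun (ws : List (List Char)) ch =>
                if ws.isEmpty || PySem.Chars.isupper ch then ws ++ [[ch]]
                else ws.dropLast ++ [(ws.getLast?.getD []) ++ [ch]]) []).map
                (fun w => PySem.List.slice w none (some (max abbreviationLength 1)))).flatten
              ++ extraWord.toList)
            ++ '.' :: (PySem.List.pyGet? (PySem.Chars.splitOn extensions ['2']) 1).getD []))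
      else
        String.ofList (input.toList ++
          ('.' :: (PySem.List.pyGet? (PySem.Chars.splitOn extensions ['2']) 0).getD []))

-- ===== PRECONDITION & SPEC =====
-- exactly where the Python A returns: the name contains '_' and the second '_'-segment contains exactly one '2'
def Pre_funIn2out (functionName : String) (input : String) (extraWord : String) (abbreviationLength : Int) : Prop :=
  2 ≤ (PySem.Chars.splitOn functionName.toList ['_']).length ∧
  PySem.Chars.count ((PySem.List.pyGet? (PySem.Chars.splitOn functionName.toList ['_']) 1).getD []) ['2'] = 1
instance (functionName : String) (input : String) (extraWord : String) (abbreviationLength : Int) : Decidable (Pre_funIn2out functionName input extraWord abbreviationLength) := by unfold Pre_funIn2out; infer_instance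

def pvWitness_funIn2out : String × String × String × Int := ("readFasta_fa2csv", "seq.fa", "", 3)

def Spec_funIn2out (functionName : String) (input : String) (extraWord : String) (abbreviationLength : Int) (out : String) : Prop := out = funIn2out_alt functionName input extraWord abbreviationLength
instance (functionName : String) (input : String) (extraWord : String) (abbreviationLength : Int) (out : String) : Decidable (Spec_funIn2out functionName input extraWord abbreviationLength out) := by unfold Spec_funIn2out; infer_instance

-- ===== CLAIM (what is proved, stated in full; the proofs are below) =====
def Claim_equal_funIn2out : Prop := ∀ (functionName : String) (input : String) (extraWord : String) (abbreviationLength : Int), Dom_funIn2out functionName input extraWord abbreviationLength → Pre_funIn2out functionName input extraWord abbreviationLength → Spec_funIn2out functionName input extraWord abbreviationLength (funIn2out functionName input extraWord abbreviationLength)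



-- ===== LEMMAS AND PROOFS =====

-- the step lambdas of the two ports, named (definitionally equal to the lambdas in the ports)
def pvStepA (L : Int) (acc : List Char × Bool × Int) (letter : Char) : List Char × Bool × Int :=
  if PySem.Chars.isupper letter || acc.2.1 then (acc.1 ++ [letter], false, 1)
  else if acc.2.2 < L then (acc.1 ++ [letter], false, acc.2.2 + 1)
  else (acc.1, false, acc.2.2)

def pvStepB (ws : List (List Char)) (ch : Char) : List (List Char) :=
  if ws.isEmpty || PySem.Chars.isupper ch then ws ++ [[ch]]
  else ws.dropLast ++ [(ws.getLast?.getD []) ++ [ch]]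

-- the common truncation semantics of both loops: k = letters kept so far in the current word
def pvGo (L : Int) : List Char → Int → List Char
  | [], _ => []
  | c :: cs, k =>
    if PySem.Chars.isupper c then c :: pvGo L cs 1
    else if k < L then c :: pvGo L cs (k + 1)
    else pvGo L cs k

lemma pvA_loop (L : Int) (cs : List Char) (s : List Char) (k : Int) :
    (cs.foldl (pvStepA L) (s, false, k)).1 = s ++ pvGo L cs k := by
  induction cs generalizing s k with
  | nil => simp [pvGo]
  | cons c cs ih =>
    rw [List.foldl_cons]
    by_cases hu : PySem.Chars.isupper c
    · rw [show pvStepA L (s, false, k) c = (s ++ [c], false, 1) by simp [pvStepA, hu], ih]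
      simp [pvGo, hu]
    · by_cases hk : k < L
      · rw [show pvStepA L (s, false, k) c = (s ++ [c], false, k + 1) by
          simp [pvStepA, hu, hk], ih]
        simp [pvGo, hu, hk]
      · rw [show pvStepA L (s, false, k) c = (s, false, k) by simp [pvStepA, hu, hk], ih]
        simp [pvGo, hu, hk]

lemma pvB_shift (cs : List Char) (ws : List (List Char)) (w : List Char) :
    cs.foldl pvStepB (ws ++ [w]) = ws ++ cs.foldl pvStepB [w] := by
  induction cs generalizing ws w with
  | nil => rfl
  | cons c cs ih =>
    rw [List.foldl_cons, List.foldl_cons]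
    by_cases hu : PySem.Chars.isupper c
    · rw [show pvStepB (ws ++ [w]) c = (ws ++ [w]) ++ [[c]] by simp [pvStepB, hu],
          show pvStepB [w] c = [w] ++ [[c]] by simp [pvStepB, hu],
          ih (ws ++ [w]) [c], ih [w] [c]]
      simp
    · rw [show pvStepB (ws ++ [w]) c = ws ++ [w ++ [c]] by
          simp [pvStepB, hu],
          show pvStepB [w] c = [w ++ [c]] by simp [pvStepB, hu]]
      exact ih ws (w ++ [c])

lemma pvB_main (L : Int) (cs : List Char) (w : List Char) (hw : w ≠ []) :
    ((cs.foldl pvStepB [w]).map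
        (fun w => PySem.List.slice w none (some (max L 1)))).flatten =
    w.take (max L 1).toNat ++ pvGo L cs (min (w.length : Int) (max L 1)) := by
  induction cs generalizing w with
  | nil => simp [pvGo, PySem.List.slice_to _ (by omega : (0:Int) ≤ max L 1)]
  | cons c cs ih =>
    have hwl : 1 ≤ w.length := List.length_pos_iff.mpr hw
    rw [List.foldl_cons]
    by_cases hu : PySem.Chars.isupper c
    · rw [show pvStepB [w] c = [w] ++ [[c]] by simp [pvStepB, hu], pvB_shift]
      rw [List.map_append, List.flatten_append, ih [c] (by simp)]
      have htake : ([c] : List Char).take (max L 1).toNat = [c] := by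
        apply List.take_of_length_le; simp
      have hmin : min ((([c] : List Char).length : Nat) : Int) (max L 1) = 1 := by
        simp only [List.length_cons, List.length_nil]; omega
      rw [htake, hmin]
      simp [pvGo, hu, PySem.List.slice_to _ (by omega : (0:Int) ≤ max L 1)]
    · rw [show pvStepB [w] c = [w ++ [c]] by simp [pvStepB, hu], ih (w ++ [c]) (by simp)]
      simp only [pvGo, hu, Bool.false_eq_true, if_false]
      by_cases hk : min ((w.length : Nat) : Int) (max L 1) < L
      · have htw : w.take (max L 1).toNat = w := List.take_of_length_le (by omega)
        have htwc : (w ++ [c]).take (max L 1).toNat = w ++ [c] := by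
          apply List.take_of_length_le; simp; omega
        have hm : min (((w ++ [c]).length : Nat) : Int) (max L 1)
            = min ((w.length : Nat) : Int) (max L 1) + 1 := by
          simp only [List.length_append, List.length_cons, List.length_nil]; push_cast; omega
        rw [if_pos hk, htw, htwc, hm]
        simp
      · have hge : (max L 1).toNat ≤ w.length := by omega
        have htwc : (w ++ [c]).take (max L 1).toNat = w.take (max L 1).toNat :=
          List.take_append_of_le_length hge
        have hm : min (((w ++ [c]).length : Nat) : Int) (max L 1)
            = min ((w.length : Nat) : Int) (max L 1) := by
          simp only [List.length_append, List.length_cons, List.length_nil]; push_cast; omega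
        rw [if_neg hk, htwc, hm]

lemma pvRpartition_endswith (s sep : List Char) (h : PySem.Chars.endswith s sep = true) :
    pvRpartition s sep = (s.take (s.length - sep.length), sep, []) := by
  obtain ⟨t, ht⟩ := (PySem.Chars.endswith_iff s sep).mp h
  subst ht
  have hlen : (t ++ sep).length - sep.length = t.length := by simp
  unfold pvRpartition
  rw [hlen, List.range_succ, List.reverse_append, List.reverse_singleton, List.singleton_append,
    List.find?_cons_of_pos (by simp)]
  simp

lemma pvIn2out_eq (input oldE newE : List Char) :
    pvIn2out input oldE newE =
      (if PySem.Chars.endswith input oldE then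
        PySem.List.slice input none (some ((input.length : Int) - oldE.length)) ++ newE
      else input ++ oldE) := by
  unfold pvIn2out
  by_cases h : PySem.Chars.endswith input oldE
  · obtain ⟨t, ht⟩ := (PySem.Chars.endswith_iff input oldE).mp h
    have hle : oldE.length ≤ input.length := by rw [← ht]; simp
    have hs : PySem.List.slice input none (some ((input.length : Int) - oldE.length))
        = input.take (input.length - oldE.length) := by
      rw [PySem.List.slice_to input (by omega)]
      congr 1
      omega
    rw [if_pos h, if_pos h, hs]
    unfold pvReplaceLast
    rw [pvRpartition_endswith input oldE h]
    simp
  · rw [if_neg h, if_neg h]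

-- ===== VERDICT (by name: the statement is the Claim_ definition above) =====
theorem funIn2out_spec : Claim_equal_funIn2out := by
  intro functionName input extraWord abbreviationLength _ hpre
  obtain ⟨hlen, hcount⟩ := hpre
  unfold Spec_funIn2out funIn2out funIn2out_alt
  set fl := PySem.Chars.splitOn functionName.toList ['_'] with hfl
  have hget : PySem.List.pyGet? fl 1 = some (fl[1]'(by omega)) := by
    rw [show (1 : Int) = ((1 : Nat) : Int) from rfl, PySem.List.pyGet?_natCast]
    simp [List.getElem?_eq_getElem (by omega : 1 < fl.length)]
  rw [hget] at hcount
  simp only [Option.getD_some] at hcount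
  simp only [hget, if_neg (show ¬ PySem.Chars.count (fl[1]'(by omega)) ['2'] ≠ 1 by
    simp [hcount])]
  set method := (PySem.List.pyGet? fl 0).getD [] with hm
  -- the two truncation loops agree
  have hloop :
      (method.foldl (pvStepA abbreviationLength) ([], true, 0)).1 =
      ((method.foldl pvStepB []).map
          (fun w => PySem.List.slice w none (some (max abbreviationLength 1)))).flatten := by
    cases method with
    | nil => rfl
    | cons c cs =>
      rw [List.foldl_cons, List.foldl_cons,
        show pvStepA abbreviationLength ([], true, 0) c = ([c], false, 1) by simp [pvStepA],
        show pvStepB [] c = [[c]] by simp [pvStepB],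
        pvA_loop, pvB_main abbreviationLength cs [c] (by simp)]
      have h1 : ([c] : List Char).take (max abbreviationLength 1).toNat = [c] := by
        apply List.take_of_length_le; simp
      have h2 : min ((([c] : List Char).length : Nat) : Int) (max abbreviationLength 1) = 1 := by
        simp only [List.length_cons, List.length_nil]; omega
      rw [h1, h2]
  rw [show (fun (acc : List Char × Bool × Int) letter =>
        if PySem.Chars.isupper letter || acc.2.1 then (acc.1 ++ [letter], false, (1 : Int))
        else if acc.2.2 < abbreviationLength then (acc.1 ++ [letter], false, acc.2.2 + 1)
        else (acc.1, false, acc.2.2)) = pvStepA abbreviationLength from rfl,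
     show (fun (ws : List (List Char)) ch =>
        if ws.isEmpty || PySem.Chars.isupper ch then ws ++ [[ch]]
        else ws.dropLast ++ [(ws.getLast?.getD []) ++ [ch]]) = pvStepB from rfl,
     hloop, pvIn2out_eq]
  by_cases hend : PySem.Chars.endswith input.toList
      ('.' :: (PySem.List.pyGet? (PySem.Chars.splitOn (fl[1]'(by omega)) ['2']) 0).getD [])
  · rw [if_pos hend, if_pos hend]
  · rw [if_neg hend, if_neg hend]
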